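-- pv_equiv track=rewrite | github.com/CAMANEM/CE-TEC-2015 | Intro y Taller de Programacion/Practicas Python/Recursividad/Pasar Bases Float.py | aux_float
-- ===== SOURCE A (Python) =====
-- def aux_float(enteros,fracs,x,flag):
--     if x==[]:
--         return enteros,fracs
--     else:
--         try:
--             int(x[0])
--             if flag==False:
--                 return aux_float(enteros+1,fracs,x[1:],False)
--             else:
--                 int(x[0])
--                 return aux_float(enteros,fracs+1,x[1:],flag)
--         except:
--             return aux_float(enteros,fracs,x[1:],True)
-- ===== SOURCE B (Python) =====
-- def aux_float(enteros, fracs, x, flag):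
--     for c in x:
--         try:
--             int(c)
--             if flag == False:
--                 enteros += 1
--             else:
--                 fracs += 1
--         except:
--             flag = True
--     return enteros, fracs
-- ===== Notes on version B (the rewrite author's own statement) =====
-- stated objective: faster
-- what changed: Replaced the tail recursion (which copies the list with x[1:] at every step) by a single iterative for-loop over the elements updating the two counters and the flag in place.
import Mathlib
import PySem

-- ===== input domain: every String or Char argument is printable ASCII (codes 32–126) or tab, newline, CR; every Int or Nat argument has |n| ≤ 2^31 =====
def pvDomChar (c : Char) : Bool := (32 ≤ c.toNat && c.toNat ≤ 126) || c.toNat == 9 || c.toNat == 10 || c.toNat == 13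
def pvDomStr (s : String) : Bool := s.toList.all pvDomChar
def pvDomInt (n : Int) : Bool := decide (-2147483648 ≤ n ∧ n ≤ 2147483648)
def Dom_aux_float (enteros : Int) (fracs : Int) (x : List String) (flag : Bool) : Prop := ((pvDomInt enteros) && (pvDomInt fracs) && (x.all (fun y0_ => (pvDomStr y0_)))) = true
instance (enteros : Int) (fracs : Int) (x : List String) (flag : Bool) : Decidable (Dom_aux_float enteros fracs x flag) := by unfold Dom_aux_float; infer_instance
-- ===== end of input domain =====

-- B replaces A's slicing tail recursion by one iterative pass (a fold) updating counters and flag in place; objective: simpler.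

-- ===== PORT A =====
def aux_float (enteros : Int) (fracs : Int) (x : List String) (flag : Bool) : Int × Int :=
  match x with
  | [] => (enteros, fracs)
  | c :: rest =>
    match PySem.Int.ofStr? c with          -- try: int(x[0]); except → none
    | some _ =>
      if flag = false then
        aux_float (enteros + 1) fracs rest false
      else
        aux_float enteros (fracs + 1) rest flag
    | none => aux_float enteros fracs rest true

-- ===== PORT B =====
-- one loop iteration of Source B's for-loop
def aux_float_step (st : Int × Int × Bool) (c : String) : Int × Int × Bool :=
  match PySem.Int.ofStr? c with
  | some _ =>
    if st.2.2 = false then (st.1 + 1, st.2.1, st.2.2)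
    else (st.1, st.2.1 + 1, st.2.2)
  | none => (st.1, st.2.1, true)

def aux_float_alt (enteros : Int) (fracs : Int) (x : List String) (flag : Bool) : Int × Int :=
  let st := x.foldl aux_float_step (enteros, fracs, flag)
  (st.1, st.2.1)

-- ===== PRECONDITION & SPEC =====
def Spec_aux_float (enteros : Int) (fracs : Int) (x : List String) (flag : Bool) (out : Int × Int) : Prop := out = aux_float_alt enteros fracs x flag
instance (enteros : Int) (fracs : Int) (x : List String) (flag : Bool) (out : Int × Int) : Decidable (Spec_aux_float enteros fracs x flag out) := by unfold Spec_aux_float; infer_instance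

-- ===== CLAIM (what is proved, stated in full; the proofs are below) =====
def Claim_equal_aux_float : Prop := ∀ (enteros : Int) (fracs : Int) (x : List String) (flag : Bool), Dom_aux_float enteros fracs x flag → Spec_aux_float enteros fracs x flag (aux_float enteros fracs x flag)

-- ===== LEMMAS AND PROOFS =====
theorem aux_float_eq_alt (x : List String) : ∀ (enteros fracs : Int) (flag : Bool),
    aux_float enteros fracs x flag = aux_float_alt enteros fracs x flag := by
  induction x with
  | nil => intro e f fl; rfl
  | cons c rest ih =>
    intro e f fl
    simp only [aux_float, aux_float_alt, List.foldl_cons]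
    cases h : PySem.Int.ofStr? c with
    | none => simpa [aux_float_alt, aux_float_step, h] using ih e f true
    | some n =>
      cases fl with
      | false => simpa [aux_float_alt, aux_float_step, h] using ih (e + 1) f false
      | true => simpa [aux_float_alt, aux_float_step, h] using ih e (f + 1) true

-- ===== VERDICT (by name: the statement is the Claim_ definition above) =====
theorem aux_float_spec : Claim_equal_aux_float := by
  intro e f x fl _
  exact aux_float_eq_alt x e f fl
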